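-- pv_equiv track=rewrite | github.com/salvac12/alter5-bi | scripts/detect_ghost_companies.py | deduplicate_contacts
-- ===== SOURCE A (Python) =====
-- from typing import Any, TypedDict
--
-- def deduplicate_contacts(
--     contacts_a: list[dict[str, Any]],
--     contacts_b: list[dict[str, Any]],
-- ) -> list[dict[str, Any]]:
--     """Merge two contact lists, dedup by email."""
--     by_email: dict[str, dict[str, Any]] = {}
--     for c in contacts_a + contacts_b:
--         email = (c.get("email") or "").lower().strip()
--         if not email:
--             continue
--         existing = by_email.get(email)
--         if existing is None:
--             by_email[email] = dict(c)
--         else: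
--             existing_role = (existing.get("role") or "").strip()
--             new_role = (c.get("role") or "").strip()
--             if (not existing_role or existing_role in ("No identificado", "nan")) \
--                     and new_role and new_role not in ("No identificado", "nan"):
--                 by_email[email] = dict(c)
--             if not existing.get("nombre") and c.get("nombre"):
--                 by_email[email]["nombre"] = c["nombre"]
--             if not existing.get("apellido") and c.get("apellido"):
--                 by_email[email]["apellido"] = c["apellido"]
--     return list(by_email.values())
-- ===== SOURCE B (Python) =====
-- def deduplicate_contacts(contacts_a, contacts_b):
--     """Merge two contact lists, dedup by email (group-then-reduce decomposition)."""
--     groups = {}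
--     for c in contacts_a + contacts_b:
--         email = (c.get("email") or "").lower().strip()
--         if email:
--             groups.setdefault(email, []).append(c)
--
--     def merge(acc, c):
--         existing_role = (acc.get("role") or "").strip()
--         new_role = (c.get("role") or "").strip()
--         if (not existing_role or existing_role in ("No identificado", "nan")) \
--                 and new_role and new_role not in ("No identificado", "nan"):
--             base = dict(c)
--         else:
--             base = dict(acc)
--         if not acc.get("nombre") and c.get("nombre"):
--             base["nombre"] = c["nombre"]
--         if not acc.get("apellido") and c.get("apellido"):
--             base["apellido"] = c["apellido"]
--         return base
--
--     result = []
--     for group in groups.values():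
--         merged = dict(group[0])
--         for c in group[1:]:
--             merged = merge(merged, c)
--         result.append(merged)
--     return result
-- ===== Notes on version B (the rewrite author's own statement) =====
-- stated objective: alternative
-- what changed: B replaces A's single incremental pass that mutates a dict of merged contacts in place with a two-phase group-then-reduce: first group all contacts into lists keyed by normalized email, then fold each group with a pure merge(acc, c) helper, so the merge logic is an isolated pure function instead of three in-place dict updates.
import Mathlib
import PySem

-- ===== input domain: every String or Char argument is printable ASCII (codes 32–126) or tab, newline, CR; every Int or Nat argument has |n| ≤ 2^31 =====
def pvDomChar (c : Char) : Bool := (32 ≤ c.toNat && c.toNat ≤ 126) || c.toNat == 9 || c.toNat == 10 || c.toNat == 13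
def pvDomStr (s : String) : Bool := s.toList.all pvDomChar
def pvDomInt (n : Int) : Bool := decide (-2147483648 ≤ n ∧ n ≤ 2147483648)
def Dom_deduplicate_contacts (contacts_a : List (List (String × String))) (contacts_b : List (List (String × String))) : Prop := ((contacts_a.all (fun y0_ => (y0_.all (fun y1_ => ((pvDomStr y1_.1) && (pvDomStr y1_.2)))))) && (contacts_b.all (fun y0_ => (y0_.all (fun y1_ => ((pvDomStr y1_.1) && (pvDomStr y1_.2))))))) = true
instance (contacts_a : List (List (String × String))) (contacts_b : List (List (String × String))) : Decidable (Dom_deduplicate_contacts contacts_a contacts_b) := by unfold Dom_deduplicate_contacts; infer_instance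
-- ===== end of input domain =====

-- B restructures A's single in-place-mutating dedup pass into group-by-email then a pure left fold
-- per group (objective: alternative decomposition, same cost); return values proved equal.

-- ===== PORT A =====
-- c.get(k) on a contact dict (contacts are association lists under the type convention)
def pvGetS (c : List (String × String)) (k : String) : Option String :=
  (PySem.Dict.mk c).get? k

-- (c.get("email") or "").lower().strip()  ('or ""' and '.getD ""' agree: both send None/"" to "")
def pvNormEmail (c : List (String × String)) : String :=
  PySem.Str.strip (PySem.Str.lower ((pvGetS c "email").getD ""))

-- (d.get("role") or "").strip()
def pvRole (d : List (String × String)) : String :=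
  PySem.Str.strip ((pvGetS d "role").getD "")

-- truthiness of d.get(k): false for None and ""
def pvTruthy (d : List (String × String)) (k : String) : Bool :=
  ((pvGetS d k).getD "") ≠ ""

-- the role-replacement condition of A's else branch
def pvReplace (existing c : List (String × String)) : Bool :=
  let er := pvRole existing
  let nr := pvRole c
  (er = "" || er = "No identificado" || er = "nan") &&
    (nr ≠ "" && (nr ≠ "No identificado" && nr ≠ "nan"))

-- d[k] = v on a contact dict
def pvSetS (d : List (String × String)) (k v : String) : List (String × String) :=
  ((PySem.Dict.mk d).insert k v).items

-- one iteration of A's loop body (c["nombre"] is ported as get-with-default; the guard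
-- 'c.get("nombre")' truthy guarantees the key is present, so the default is unreachable)
def dedupStepA (by_email : PySem.Dict String (List (String × String)))
    (c : List (String × String)) : PySem.Dict String (List (String × String)) :=
  let email := pvNormEmail c
  if email = "" then by_email
  else
    match by_email.get? email with
    | none => by_email.insert email c
    | some existing =>
      let b1 := if pvReplace existing c then by_email.insert email c else by_email
      let b2 := if !pvTruthy existing "nombre" && pvTruthy c "nombre"
                then b1.insert email (pvSetS ((b1.get? email).getD []) "nombre" ((pvGetS c "nombre").getD ""))
                else b1
      let b3 := if !pvTruthy existing "apellido" && pvTruthy c "apellido"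
                then b2.insert email (pvSetS ((b2.get? email).getD []) "apellido" ((pvGetS c "apellido").getD ""))
                else b2
      b3

def deduplicate_contacts (contacts_a : List (List (String × String))) (contacts_b : List (List (String × String))) : List (List (String × String)) :=
  ((contacts_a ++ contacts_b).foldl dedupStepA PySem.Dict.empty).values

-- ===== PORT B =====
-- B's pure merge(acc, c) helper
def pvMerge (acc c : List (String × String)) : List (String × String) :=
  let base := if pvReplace acc c then c else acc
  let base := if !pvTruthy acc "nombre" && pvTruthy c "nombre"
              then pvSetS base "nombre" ((pvGetS c "nombre").getD "") else base
  let base := if !pvTruthy acc "apellido" && pvTruthy c "apellido"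
              then pvSetS base "apellido" ((pvGetS c "apellido").getD "") else base
  base

-- groups.setdefault(email, []).append(c)
def pvGroupStep (g : PySem.Dict String (List (List (String × String))))
    (c : List (String × String)) : PySem.Dict String (List (List (String × String))) :=
  let email := pvNormEmail c
  if email = "" then g else g.insert email (g.getD email [] ++ [c])

-- merged = group[0]; then fold merge over group[1:]
def pvReduceGroup (cs : List (List (String × String))) : List (String × String) :=
  match cs with
  | [] => []
  | h :: t => t.foldl pvMerge h

def deduplicate_contacts_alt (contacts_a : List (List (String × String))) (contacts_b : List (List (String × String))) : List (List (String × String)) :=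
  let groups := (contacts_a ++ contacts_b).foldl pvGroupStep PySem.Dict.empty
  groups.values.map pvReduceGroup

-- ===== PRECONDITION & SPEC =====
def Spec_deduplicate_contacts (contacts_a : List (List (String × String))) (contacts_b : List (List (String × String))) (out : List (List (String × String))) : Prop := out = deduplicate_contacts_alt contacts_a contacts_b
instance (contacts_a : List (List (String × String))) (contacts_b : List (List (String × String))) (out : List (List (String × String))) : Decidable (Spec_deduplicate_contacts contacts_a contacts_b out) := by unfold Spec_deduplicate_contacts; infer_instance

-- ===== CLAIM (what is proved, stated in full; the proofs are below) =====
def Claim_equal_deduplicate_contacts : Prop := ∀ (contacts_a : List (List (String × String))) (contacts_b : List (List (String × String))), Dom_deduplicate_contacts contacts_a contacts_b → Spec_deduplicate_contacts contacts_a contacts_b (deduplicate_contacts contacts_a contacts_b)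

-- ===== LEMMAS AND PROOFS =====

-- R g : the dict A maintains, expressed from B's group dict (same keys, each group reduced)
def pvR (g : PySem.Dict String (List (List (String × String)))) :
    PySem.Dict String (List (String × String)) :=
  PySem.Dict.mk (g.items.map (fun p => (p.1, pvReduceGroup p.2)))

theorem pvR_get? (g : PySem.Dict String (List (List (String × String)))) (k : String) :
    (pvR g).get? k = (g.get? k).map pvReduceGroup := by
  obtain ⟨l⟩ := g
  induction l with
  | nil => rfl
  | cons p t ih =>
    simp only [pvR, PySem.Dict.get?, List.map_cons, List.find?_cons] at *
    by_cases h : p.1 == k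
    · simp [h]
    · simp only [h] at *; simpa using ih

theorem pvR_contains (g : PySem.Dict String (List (List (String × String)))) (k : String) :
    (pvR g).contains k = g.contains k := by
  obtain ⟨l⟩ := g
  simp [pvR, PySem.Dict.contains, List.any_map, Function.comp_def]

theorem pvR_insert (g : PySem.Dict String (List (List (String × String)))) (k : String)
    (v : List (List (String × String))) :
    pvR (g.insert k v) = (pvR g).insert k (pvReduceGroup v) := by
  apply PySem.Dict.ext
  by_cases hc : g.contains k = true
  · rw [show (g.insert k v) = PySem.Dict.mk (g.items.map (fun p => if (p.1 == k) = true then (k, v) else p)) from by simp [PySem.Dict.insert, hc]]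
    rw [show ((pvR g).insert k (pvReduceGroup v)) = PySem.Dict.mk ((pvR g).items.map (fun p => if (p.1 == k) = true then (k, pvReduceGroup v) else p)) from by simp [PySem.Dict.insert, pvR_contains, hc]]
    simp only [pvR, List.map_map]
    apply List.map_congr_left
    intro p _
    by_cases hp : p.1 = k <;> simp [hp]
  · rw [show (g.insert k v) = PySem.Dict.mk (g.items ++ [(k, v)]) from by simp [PySem.Dict.insert, hc]]
    rw [show ((pvR g).insert k (pvReduceGroup v)) = PySem.Dict.mk ((pvR g).items ++ [(k, pvReduceGroup v)]) from by simp [PySem.Dict.insert, pvR_contains, hc]]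
    simp [pvR]

theorem pvR_keys (g : PySem.Dict String (List (List (String × String)))) :
    (pvR g).keys = g.keys := by
  obtain ⟨l⟩ := g
  simp [pvR, PySem.Dict.keys, List.map_map, Function.comp_def]

-- replacing the (unique) binding of k by its own current value is the identity
theorem rep_id {V : Type} (k : String) (v : V) (l : List (String × V))
    (hn : (l.map Prod.fst).Nodup)
    (h : (l.find? (fun p => p.1 == k)).map (fun p => p.2) = some v) :
    l.map (fun p => if (p.1 == k) = true then (k, v) else p) = l := by
  induction l with
  | nil => simp at h
  | cons p t ih =>
    simp only [List.map_cons, List.nodup_cons] at hn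
    rw [List.find?_cons] at h
    by_cases hp : (p.1 == k) = true
    · simp only [hp] at h
      have hpk : p.1 = k := by simpa using hp
      have hv : p.2 = v := by simpa using h
      have htail : ∀ q ∈ t, (fun p => if (p.1 == k) = true then (k, v) else p) q = q := by
        intro q hq
        have hqk : q.1 ≠ k := by
          intro hc
          exact hn.1 (by rw [hpk, ← hc]; exact List.mem_map.2 ⟨q, hq, rfl⟩)
        simp [hqk]
      rw [List.map_cons, if_pos hp]
      refine congrArg₂ List.cons ?_ ?_
      · exact Prod.ext (by simp [hpk]) (by simp [hv.symm])
      · rw [List.map_congr_left htail]; exact List.map_id t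
    · simp only [hp] at h
      rw [List.map_cons, if_neg hp, ih hn.2 h]

theorem insert_get_self (d : PySem.Dict String (List (String × String))) (k : String)
    (v : List (String × String)) (hn : d.keys.Nodup) (h : d.get? k = some v) :
    d.insert k v = d := by
  have hc : d.contains k = true := by
    rw [PySem.Dict.contains_eq_isSome_get?, h]; rfl
  apply PySem.Dict.ext
  rw [show (d.insert k v) = PySem.Dict.mk (d.items.map (fun p => if (p.1 == k) = true then (k, v) else p)) from by simp [PySem.Dict.insert, hc]]
  exact rep_id k v d.items hn (by simpa [PySem.Dict.get?] using h)

-- A's else branch is one functional insert of B's pure merge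
theorem stepA_else (d : PySem.Dict String (List (String × String)))
    (existing c : List (String × String)) (hn : d.keys.Nodup)
    (hne : ¬ pvNormEmail c = "") (hd : d.get? (pvNormEmail c) = some existing) :
    dedupStepA d c = d.insert (pvNormEmail c) (pvMerge existing c) := by
  unfold dedupStepA
  simp only [if_neg hne, hd]
  have hb1 : (if pvReplace existing c then d.insert (pvNormEmail c) c else d)
      = d.insert (pvNormEmail c) (if pvReplace existing c then c else existing) := by
    by_cases hr : pvReplace existing c
    · simp [hr]
    · simp [hr, insert_get_self d (pvNormEmail c) existing hn hd]
  rw [hb1]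
  have pvMerge_def : pvMerge existing c =
      (if !pvTruthy existing "apellido" && pvTruthy c "apellido"
       then pvSetS (if !pvTruthy existing "nombre" && pvTruthy c "nombre"
                    then pvSetS (if pvReplace existing c then c else existing) "nombre" ((pvGetS c "nombre").getD "")
                    else (if pvReplace existing c then c else existing)) "apellido" ((pvGetS c "apellido").getD "")
       else (if !pvTruthy existing "nombre" && pvTruthy c "nombre"
             then pvSetS (if pvReplace existing c then c else existing) "nombre" ((pvGetS c "nombre").getD "")
             else (if pvReplace existing c then c else existing))) := rfl
  rw [pvMerge_def]
  set b1 := if pvReplace existing c then c else existing with hb1d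
  have hb2 : (if !pvTruthy existing "nombre" && pvTruthy c "nombre"
      then (d.insert (pvNormEmail c) b1).insert (pvNormEmail c)
        (pvSetS (((d.insert (pvNormEmail c) b1).get? (pvNormEmail c)).getD []) "nombre" ((pvGetS c "nombre").getD ""))
      else d.insert (pvNormEmail c) b1)
      = d.insert (pvNormEmail c)
        (if !pvTruthy existing "nombre" && pvTruthy c "nombre"
         then pvSetS b1 "nombre" ((pvGetS c "nombre").getD "") else b1) := by
    by_cases h2 : (!pvTruthy existing "nombre" && pvTruthy c "nombre") = true
    · simp [h2, PySem.Dict.get?_insert_self, PySem.Dict.insert_insert_self]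
    · simp [h2]
  rw [hb2]
  set b2 := if !pvTruthy existing "nombre" && pvTruthy c "nombre"
            then pvSetS b1 "nombre" ((pvGetS c "nombre").getD "") else b1 with hb2d
  by_cases h3 : (!pvTruthy existing "apellido" && pvTruthy c "apellido") = true
  · rw [if_pos h3, if_pos h3, PySem.Dict.get?_insert_self, Option.getD_some,
      PySem.Dict.insert_insert_self]
  · rw [if_neg h3, if_neg h3]

theorem step_comm (g : PySem.Dict String (List (List (String × String))))
    (c : List (String × String)) (hn : g.keys.Nodup)
    (hne : ∀ p ∈ g.items, p.2 ≠ []) :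
    dedupStepA (pvR g) c = pvR (pvGroupStep g c) := by
  by_cases he : pvNormEmail c = ""
  · unfold dedupStepA pvGroupStep
    simp [he]
  · cases hg : g.get? (pvNormEmail c) with
    | none =>
      unfold dedupStepA pvGroupStep
      rw [if_neg he, if_neg he, pvR_get?, hg]
      simp only [Option.map_none]
      rw [show g.getD (pvNormEmail c) [] = [] from by simp [PySem.Dict.getD, hg]]
      rw [pvR_insert]
      rfl
    | some cs =>
      have hmem : (pvNormEmail c, cs) ∈ g.items := PySem.Dict.mem_items_of_get?_eq_some g hg
      obtain ⟨h, t, rfl⟩ : ∃ h t, cs = h :: t := by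
        cases cs with
        | nil => exact absurd rfl (hne _ hmem)
        | cons h t => exact ⟨h, t, rfl⟩
      rw [stepA_else (pvR g) (pvReduceGroup (h :: t)) c (by rw [pvR_keys]; exact hn) he
            (by rw [pvR_get?, hg]; rfl)]
      unfold pvGroupStep
      rw [if_neg he]
      rw [show g.getD (pvNormEmail c) [] = h :: t from by simp [PySem.Dict.getD, hg]]
      rw [pvR_insert]
      congr 1
      show pvMerge (t.foldl pvMerge h) c = (t ++ [c]).foldl pvMerge h
      rw [List.foldl_append]
      rfl

theorem groupStep_nodup (g : PySem.Dict String (List (List (String × String))))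
    (c : List (String × String)) (hn : g.keys.Nodup) : (pvGroupStep g c).keys.Nodup := by
  unfold pvGroupStep
  by_cases he : pvNormEmail c = ""
  · simpa [he] using hn
  · rw [if_neg he]
    exact PySem.Dict.nodup_keys_insert _ _ _ hn

theorem groupStep_ne (g : PySem.Dict String (List (List (String × String))))
    (c : List (String × String)) (hne : ∀ p ∈ g.items, p.2 ≠ []) :
    ∀ p ∈ (pvGroupStep g c).items, p.2 ≠ [] := by
  unfold pvGroupStep
  by_cases he : pvNormEmail c = ""
  · simpa [he] using hne
  · rw [if_neg he]
    intro p hp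
    rcases (PySem.Dict.mem_items_insert _ _ _ _).1 hp with h | h
    · rw [h]; simp
    · exact hne p h.1

theorem fold_comm (l : List (List (String × String)))
    (g : PySem.Dict String (List (List (String × String)))) (hn : g.keys.Nodup)
    (hne : ∀ p ∈ g.items, p.2 ≠ []) :
    l.foldl dedupStepA (pvR g) = pvR (l.foldl pvGroupStep g) := by
  induction l generalizing g with
  | nil => rfl
  | cons c t ih =>
    rw [List.foldl_cons, List.foldl_cons, step_comm g c hn hne]
    exact ih (pvGroupStep g c) (groupStep_nodup g c hn) (groupStep_ne g c hne)

-- ===== VERDICT (by name: the statement is the Claim_ definition above) =====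
theorem deduplicate_contacts_spec : Claim_equal_deduplicate_contacts := by
  intro a b _
  unfold Spec_deduplicate_contacts deduplicate_contacts deduplicate_contacts_alt
  rw [show (PySem.Dict.empty : PySem.Dict String (List (String × String))) = pvR PySem.Dict.empty from rfl]
  rw [fold_comm (a ++ b) PySem.Dict.empty (by simp [PySem.Dict.keys, PySem.Dict.empty]) (by simp [PySem.Dict.empty])]
  simp [pvR, PySem.Dict.values, List.map_map, Function.comp_def]
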